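-- pv_equiv track=rewrite | github.com/emerzon/mt-data-mcp | src/mtdata/utils/simplify.py | _finalize_indices
-- ===== SOURCE A (Python) =====
-- from typing import Any, Dict, List, Optional, Tuple
--
-- def _finalize_indices(n: int, idxs: List[int]) -> List[int]:
--     """Ensure first/last indices exist and output is unique/increasing."""
--     if n <= 0:
--         return []
--     if not idxs:
--         return list(range(n))
--     out = sorted(set(int(i) for i in idxs if 0 <= int(i) < n))
--     if not out:
--         return [0, n - 1] if n > 1 else [0]
--     if out[0] != 0:
--         out.insert(0, 0)
--     if out[-1] != n - 1:
--         out.append(n - 1)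
--     return out
-- ===== SOURCE B (Python) =====
-- from typing import List
--
-- def _insert_sorted(out: List[int], j: int) -> None:
--     """Insert j into the ascending list out, skipping if already present."""
--     k = 0
--     while k < len(out) and out[k] < j:
--         k += 1
--     if k == len(out) or out[k] != j:
--         out.insert(k, j)
--
-- def _finalize_indices(n: int, idxs: List[int]) -> List[int]:
--     """Ensure first/last indices exist and output is unique/increasing."""
--     if n <= 0:
--         return []
--     if not idxs:
--         return list(range(n))
--     out = [0, n - 1] if n > 1 else [0]
--     for i in idxs:
--         j = int(i)
--         if 0 <= j < n:
--             _insert_sorted(out, j)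
--     return out
-- ===== Notes on version B (the rewrite author's own statement) =====
-- stated objective: alternative
-- what changed: Replaces A's sorted(set(...)) plus conditional endpoint insert/append patching (and its empty-result special case) by seeding the result with the endpoints [0, n-1] and performing online ordered insertion with duplicate skipping for each in-range index -- no set, no sort call, no endpoint patching.
import Mathlib
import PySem

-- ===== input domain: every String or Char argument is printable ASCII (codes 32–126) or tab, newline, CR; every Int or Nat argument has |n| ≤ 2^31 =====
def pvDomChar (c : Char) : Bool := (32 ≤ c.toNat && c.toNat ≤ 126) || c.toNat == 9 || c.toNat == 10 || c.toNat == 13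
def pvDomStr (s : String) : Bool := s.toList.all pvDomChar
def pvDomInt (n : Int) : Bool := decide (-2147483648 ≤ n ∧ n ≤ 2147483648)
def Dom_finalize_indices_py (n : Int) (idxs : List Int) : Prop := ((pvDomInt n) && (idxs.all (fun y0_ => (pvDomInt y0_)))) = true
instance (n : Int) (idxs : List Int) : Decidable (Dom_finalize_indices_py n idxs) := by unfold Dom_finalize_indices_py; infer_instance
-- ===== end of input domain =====

-- B replaces A's sorted(set(...)) + endpoint insert/append patching by seeding the endpoints
-- and doing online ordered insertion with duplicate skipping (objective: alternative).

-- ===== PORT A =====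
-- Helper for A's endpoint patching: out.insert(0, 0) if out[0] != 0, out.append(n-1) if out[-1] != n-1.
def pvPatch (n : Int) (out : List Int) : List Int :=
  let out1 := if out.head? ≠ some 0 then 0 :: out else out
  if out1.getLast? ≠ some (n - 1) then out1 ++ [n - 1] else out1

def finalize_indices_py (n : Int) (idxs : List Int) : List Int :=
  if n ≤ 0 then []
  else if idxs = [] then PySem.List.pyRange 0 n 1
  else
    let out := PySem.List.sorted
      (PySem.Set.ofList (idxs.filter (fun i => decide (0 ≤ i) && decide (i < n))))
      (fun x => x) false
    if out = [] then (if 1 < n then [0, n - 1] else [0])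
    else pvPatch n out

-- ===== PORT B =====
-- _insert_sorted's index walk over the ascending list, as the obvious structural recursion.
def pvInsertSorted : List Int → Int → List Int
  | [], j => [j]
  | a :: t, j => if a < j then a :: pvInsertSorted t j
                 else if a = j then a :: t
                 else j :: a :: t

def finalize_indices_py_alt (n : Int) (idxs : List Int) : List Int :=
  if n ≤ 0 then []
  else if idxs = [] then PySem.List.pyRange 0 n 1
  else
    idxs.foldl (fun out i => if 0 ≤ i ∧ i < n then pvInsertSorted out i else out)
      (if 1 < n then [0, n - 1] else [0])

-- ===== PRECONDITION & SPEC =====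
def Spec_finalize_indices_py (n : Int) (idxs : List Int) (out : List Int) : Prop := out = finalize_indices_py_alt n idxs
instance (n : Int) (idxs : List Int) (out : List Int) : Decidable (Spec_finalize_indices_py n idxs out) := by unfold Spec_finalize_indices_py; infer_instance

-- ===== CLAIM (what is proved, stated in full; the proofs are below) =====
def Claim_equal_finalize_indices_py : Prop := ∀ (n : Int) (idxs : List Int), Dom_finalize_indices_py n idxs → Spec_finalize_indices_py n idxs (finalize_indices_py n idxs)

-- ===== LEMMAS AND PROOFS =====

-- In a strictly increasing list every element is ≤ the last one.
lemma pv_le_getLast {l : List Int} (h : l.Pairwise (· < ·)) (hne : l ≠ []) :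
    ∀ x ∈ l, x ≤ l.getLast hne := by
  induction l with
  | nil => simp
  | cons a t ih =>
    intro x hx
    rcases List.pairwise_cons.mp h with ⟨ha, ht⟩
    cases t with
    | nil =>
        simp only [List.mem_cons, List.not_mem_nil, or_false] at hx
        subst hx; simp [List.getLast]
    | cons b u =>
      have hlast : (a :: b :: u).getLast hne = (b :: u).getLast (by simp) := by
        simp [List.getLast]
      rw [hlast]
      rcases List.mem_cons.mp hx with rfl | hx'
      · exact le_of_lt (ha _ (List.getLast_mem _))
      · exact ih ht (by simp) x hx'

-- Two strictly increasing lists with the same members are equal.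
lemma pv_eq_of_pairwise_lt {l₁ l₂ : List Int}
    (h₁ : l₁.Pairwise (· < ·)) (h₂ : l₂.Pairwise (· < ·))
    (hmem : ∀ x, x ∈ l₁ ↔ x ∈ l₂) : l₁ = l₂ := by
  have hn₁ : l₁.Nodup := h₁.imp (fun h => ne_of_lt h)
  have hn₂ : l₂.Nodup := h₂.imp (fun h => ne_of_lt h)
  have hperm : l₁.Perm l₂ := (List.perm_ext_iff_of_nodup hn₁ hn₂).mpr hmem
  exact hperm.eq_of_pairwise (fun a b ha hb hab hba => le_antisymm hab hba)
    (h₁.imp le_of_lt) (h₂.imp le_of_lt)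

-- Ordered insertion with dedup: stays strictly increasing, adds exactly j to the members.
lemma pv_ins_char (j : Int) : ∀ (l : List Int), l.Pairwise (· < ·) →
    ((pvInsertSorted l j).Pairwise (· < ·) ∧
     ∀ x : Int, x ∈ pvInsertSorted l j ↔ (x = j ∨ x ∈ l)) := by
  intro l
  induction l with
  | nil => intro _; simp [pvInsertSorted]
  | cons a t ih =>
    intro h
    rcases List.pairwise_cons.mp h with ⟨ha, ht⟩
    obtain ⟨hp, hm⟩ := ih ht
    simp only [pvInsertSorted]
    by_cases h1 : a < j
    · rw [if_pos h1]
      constructor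
      · refine List.pairwise_cons.mpr ⟨?_, hp⟩
        intro x hx
        rcases (hm x).mp hx with rfl | hx'
        · exact h1
        · exact ha x hx'
      · intro x
        simp only [List.mem_cons, hm x]
        tauto
    · rw [if_neg h1]
      by_cases h2 : a = j
      · rw [if_pos h2]
        refine ⟨h, ?_⟩
        intro x
        simp only [List.mem_cons]
        subst h2; tauto
      · rw [if_neg h2]
        constructor
        · refine List.pairwise_cons.mpr ⟨?_, h⟩
          intro x hx
          rcases List.mem_cons.mp hx with rfl | hx'
          · omega
          · have := ha x hx'; omega
        · intro x; simp only [List.mem_cons]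
-- Invariant of B's insertion fold.
lemma pv_fold_ins (n : Int) : ∀ (l : List Int) (acc : List Int), acc.Pairwise (· < ·) →
    ((l.foldl (fun out i => if 0 ≤ i ∧ i < n then pvInsertSorted out i else out) acc).Pairwise (· < ·) ∧
     ∀ x : Int, x ∈ l.foldl (fun out i => if 0 ≤ i ∧ i < n then pvInsertSorted out i else out) acc ↔
       (x ∈ acc ∨ (0 ≤ x ∧ x < n ∧ x ∈ l))) := by
  intro l
  induction l with
  | nil => intro acc hacc; simp [hacc]
  | cons i t ih =>
    intro acc hacc
    simp only [List.foldl_cons]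
    by_cases hc : 0 ≤ i ∧ i < n
    · rw [if_pos hc]
      obtain ⟨hp1, hm1⟩ := pv_ins_char i acc hacc
      obtain ⟨hp, hm⟩ := ih (pvInsertSorted acc i) hp1
      refine ⟨hp, ?_⟩
      intro x
      rw [hm x, hm1 x]
      simp only [List.mem_cons]
      constructor
      · rintro ((rfl | hx) | ⟨h0, hn', hx⟩)
        · exact Or.inr ⟨hc.1, hc.2, Or.inl rfl⟩
        · exact Or.inl hx
        · exact Or.inr ⟨h0, hn', Or.inr hx⟩
      · rintro (hx | ⟨h0, hn', (rfl | hx)⟩)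
        · exact Or.inl (Or.inr hx)
        · exact Or.inl (Or.inl rfl)
        · exact Or.inr ⟨h0, hn', hx⟩
    · rw [if_neg hc]
      obtain ⟨hp, hm⟩ := ih acc hacc
      refine ⟨hp, ?_⟩
      intro x
      rw [hm x]
      simp only [List.mem_cons]
      constructor
      · rintro (hx | ⟨h0, hn', hx⟩)
        · exact Or.inl hx
        · exact Or.inr ⟨h0, hn', Or.inr hx⟩
      · rintro (hx | ⟨h0, hn', (rfl | hx)⟩)
        · exact Or.inl hx
        · exact absurd ⟨h0, hn'⟩ hc
        · exact Or.inr ⟨h0, hn', hx⟩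

-- B's result is strictly increasing with exactly the combined membership.
lemma pv_B_char (n : Int) (idxs : List Int) (hn : 0 < n) (hne : idxs ≠ []) :
    (finalize_indices_py_alt n idxs).Pairwise (· < ·) ∧
    ∀ x : Int, x ∈ finalize_indices_py_alt n idxs ↔
      (0 ≤ x ∧ x < n ∧ (x = 0 ∨ x = n - 1 ∨ x ∈ idxs)) := by
  simp only [finalize_indices_py_alt]
  rw [if_neg (by omega), if_neg hne]
  set acc := if 1 < n then ([0, n - 1] : List Int) else [0] with hacc
  have haccp : acc.Pairwise (· < ·) := by
    rw [hacc]; split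
    · simp; omega
    · simp
  have haccm : ∀ x : Int, x ∈ acc ↔ (x = 0 ∨ x = n - 1) := by
    intro x
    rw [hacc]; split
    · simp
    · simp; omega
  obtain ⟨hp, hm⟩ := pv_fold_ins n idxs acc haccp
  refine ⟨hp, ?_⟩
  intro x
  rw [hm x, haccm x]
  constructor
  · rintro ((rfl | rfl) | ⟨h0, hn', hx⟩)
    · exact ⟨le_rfl, hn, Or.inl rfl⟩
    · exact ⟨by omega, by omega, Or.inr (Or.inl rfl)⟩
    · exact ⟨h0, hn', Or.inr (Or.inr hx)⟩
  · rintro ⟨h0, hn', (rfl | rfl | hx)⟩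
    · exact Or.inl (Or.inl rfl)
    · exact Or.inl (Or.inr rfl)
    · exact Or.inr ⟨h0, hn', hx⟩

-- A's endpoint patching on a nonempty strictly increasing list of in-range indices.
lemma pv_patch_char (n : Int) (hn : 0 < n) (out : List Int)
    (hpw : out.Pairwise (· < ·)) (hne : out ≠ [])
    (hbounds : ∀ x ∈ out, 0 ≤ x ∧ x < n) :
    (pvPatch n out).Pairwise (· < ·) ∧
    ∀ x : Int, x ∈ pvPatch n out ↔ (x = 0 ∨ x = n - 1 ∨ x ∈ out) := by
  have hdef : pvPatch n out
      = (if (if out.head? ≠ some 0 then 0 :: out else out).getLast? ≠ some (n - 1)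
         then (if out.head? ≠ some 0 then 0 :: out else out) ++ [n - 1]
         else (if out.head? ≠ some 0 then 0 :: out else out)) := rfl
  set out1 := if out.head? ≠ some 0 then 0 :: out else out with hout1
  obtain ⟨a, t, hat⟩ := List.exists_cons_of_ne_nil hne
  have hhead : out.head? = some a := by rw [hat]; rfl
  have hatmin : ∀ x ∈ t, a < x := by
    rw [hat] at hpw; exact (List.pairwise_cons.mp hpw).1
  have hpw1 : out1.Pairwise (· < ·) := by
    rw [hout1, hhead]
    by_cases ha0 : a = 0
    · simp only [ha0, ne_eq, not_true_eq_false, if_false]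
      simpa using hpw
    · rw [if_pos (by simp [ha0])]
      refine List.pairwise_cons.mpr ⟨?_, hpw⟩
      intro x hx
      have hx0 := (hbounds x hx).1
      have ha0' := (hbounds a (by rw [hat]; simp)).1
      rw [hat] at hx
      rcases List.mem_cons.mp hx with rfl | hxt
      · omega
      · have := hatmin x hxt; omega
  have hmem1 : ∀ x : Int, x ∈ out1 ↔ (x = 0 ∨ x ∈ out) := by
    intro x
    rw [hout1, hhead]
    by_cases ha0 : a = 0
    · simp only [ha0, ne_eq, not_true_eq_false, if_false]
      constructor
      · intro h; right; exact h
      · rintro (rfl | h)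
        · rw [hat, ← ha0]; exact List.mem_cons_self
        · exact h
    · rw [if_pos (by simp [ha0])]; simp
  have hne1 : out1 ≠ [] := by
    rw [hout1]; split
    · simp
    · exact hne
  have hb1 : ∀ x ∈ out1, 0 ≤ x ∧ x < n := by
    intro x hx
    rcases (hmem1 x).mp hx with rfl | hx'
    · exact ⟨le_rfl, hn⟩
    · exact hbounds x hx'
  rw [hdef]
  by_cases hl : out1.getLast? ≠ some (n - 1)
  · rw [if_pos hl]
    have hlast : out1.getLast hne1 ≠ n - 1 := by
      intro h; apply hl; rw [List.getLast?_eq_some_getLast hne1, h]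
    have hlt : ∀ x ∈ out1, x < n - 1 := by
      intro x hx
      have hle := pv_le_getLast hpw1 hne1 x hx
      have := (hb1 _ (List.getLast_mem hne1)).2
      omega
    constructor
    · rw [List.pairwise_append]
      exact ⟨hpw1, by simp, by intro x hx y hy; simp at hy; subst hy; exact hlt x hx⟩
    · intro x
      rw [List.mem_append, hmem1]
      simp only [List.mem_singleton]
      constructor
      · rintro ((rfl | hx) | rfl)
        · exact Or.inl rfl
        · exact Or.inr (Or.inr hx)
        · exact Or.inr (Or.inl rfl)
      · rintro (rfl | rfl | hxi)
        · exact Or.inl (Or.inl rfl)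
        · exact Or.inr rfl
        · exact Or.inl (Or.inr hxi)
  · rw [if_neg hl]
    have hl' : out1.getLast? = some (n - 1) := not_not.mp hl
    have hn1mem : (n - 1) ∈ out1 := by
      have hg := List.getLast?_eq_some_getLast hne1
      rw [hg, Option.some_inj] at hl'
      have := List.getLast_mem hne1
      rwa [hl'] at this
    refine ⟨hpw1, ?_⟩
    intro x
    rw [hmem1]
    constructor
    · rintro (rfl | hx)
      · exact Or.inl rfl
      · exact Or.inr (Or.inr hx)
    · rintro (rfl | rfl | hxi)
      · exact Or.inl rfl
      · exact (hmem1 (n-1)).mp hn1mem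
      · exact Or.inr hxi

-- A's result is strictly increasing with exactly the combined membership.
lemma pv_A_char (n : Int) (idxs : List Int) (hn : 0 < n) (hne : idxs ≠ []) :
    (finalize_indices_py n idxs).Pairwise (· < ·) ∧
    ∀ x : Int, x ∈ finalize_indices_py n idxs ↔
      (0 ≤ x ∧ x < n ∧ (x = 0 ∨ x = n - 1 ∨ x ∈ idxs)) := by
  simp only [finalize_indices_py]
  rw [if_neg (by omega), if_neg hne]
  set fl := idxs.filter (fun i => decide (0 ≤ i) && decide (i < n)) with hfl
  set out := PySem.List.sorted (PySem.Set.ofList fl) (fun x => x) false with hout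
  have hpw : out.Pairwise (· < ·) := PySem.List.sorted_ofList_pairwise_lt fl
  have hmem : ∀ x : Int, x ∈ out ↔ (x ∈ idxs ∧ 0 ≤ x ∧ x < n) := by
    intro x
    rw [hout, PySem.List.mem_sorted, PySem.Set.mem_ofList, hfl, List.mem_filter]
    simp
  by_cases ho : out = []
  · rw [if_pos ho]
    have hno : ∀ x : Int, ¬ (x ∈ idxs ∧ 0 ≤ x ∧ x < n) := by
      intro x hx; have := (hmem x).mpr hx; rw [ho] at this; simp at this
    by_cases h1 : 1 < n
    · rw [if_pos h1]
      constructor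
      · simp; omega
      · intro x
        simp only [List.mem_cons, List.not_mem_nil, or_false]
        constructor
        · rintro (rfl | rfl)
          · exact ⟨le_rfl, hn, Or.inl rfl⟩
          · exact ⟨by omega, by omega, Or.inr (Or.inl rfl)⟩
        · rintro ⟨hx0, hxn, (rfl | rfl | hxi)⟩
          · left; rfl
          · right; rfl
          · exact absurd ⟨hxi, hx0, hxn⟩ (hno x)
    · rw [if_neg h1]
      constructor
      · simp
      · intro x
        simp only [List.mem_singleton]
        constructor
        · rintro rfl
          exact ⟨le_rfl, hn, Or.inl rfl⟩
        · rintro ⟨hx0, hxn, _⟩; omega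
  · rw [if_neg ho]
    have hbounds : ∀ x ∈ out, 0 ≤ x ∧ x < n :=
      fun x hx => ⟨((hmem x).mp hx).2.1, ((hmem x).mp hx).2.2⟩
    obtain ⟨hpw', hmem'⟩ := pv_patch_char n hn out hpw ho hbounds
    refine ⟨hpw', ?_⟩
    intro x
    rw [hmem' x]
    constructor
    · rintro (rfl | rfl | hx)
      · exact ⟨le_rfl, hn, Or.inl rfl⟩
      · exact ⟨by omega, by omega, Or.inr (Or.inl rfl)⟩
      · have := (hmem x).mp hx
        exact ⟨this.2.1, this.2.2, Or.inr (Or.inr this.1)⟩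
    · rintro ⟨hx0, hxn, (rfl | rfl | hxi)⟩
      · exact Or.inl rfl
      · exact Or.inr (Or.inl rfl)
      · exact Or.inr (Or.inr ((hmem x).mpr ⟨hxi, hx0, hxn⟩))

-- ===== VERDICT (by name: the statement is the Claim_ definition above) =====
theorem finalize_indices_py_spec : Claim_equal_finalize_indices_py := by
  intro n idxs _
  unfold Spec_finalize_indices_py
  by_cases hn : n ≤ 0
  · simp [finalize_indices_py, finalize_indices_py_alt, hn]
  · by_cases hne : idxs = []
    · simp [finalize_indices_py, finalize_indices_py_alt, hn, hne]
    · have hn' : 0 < n := by omega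
      obtain ⟨hpA, hmA⟩ := pv_A_char n idxs hn' hne
      obtain ⟨hpB, hmB⟩ := pv_B_char n idxs hn' hne
      exact pv_eq_of_pairwise_lt hpA hpB (fun x => (hmA x).trans (hmB x).symm)
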